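-- pv_equiv track=rewrite | github.com/nmi21/euler | 046/main.py | get_composite_odds
-- ===== SOURCE A (Python) =====
-- def sieve_of_eratosthenes(n):
--     sieve = [True] * (n + 1)
--     sieve[0] = sieve[1] = False
--     for even in range(4, n + 1, 2):
--         sieve[even] = False
--     for i in range(3, n+1, 2):
--         if sieve[i]:
--             for j in range(2*i, n+1, i):
--                 sieve[j] = False
--     return sieve
--
-- def get_primes(n):
--     return [ind for ind, x in enumerate(sieve_of_eratosthenes(n)) if x]
--
-- def get_composite_odds(n):
--     # again make a sieve, and initialize so that 0 and 1 are false
--     comp_odds = [True] * (n+1)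
--     comp_odds[0] = comp_odds[1] = False
--
--     # remove even numbers
--     for i in range(2, n+1, 2):
--         comp_odds[i] = False
--
--     # now we have all odds, but need to change to numbers
--     primes = get_primes(n)
--     comp_odds = [ind for ind, x in enumerate(comp_odds) if comp_odds[ind] and ind not in primes]
--
--     return comp_odds
-- ===== SOURCE B (Python) =====
-- def get_composite_odds(n):
--     # Mark every odd multiple j = i * (3, 5, 7, ...) of every odd i >= 3 as
--     # composite, then read off the marked odds.  No primality test and no
--     # list-membership scan, so this is O(n log n) versus A's quadratic scan.
--     is_comp = [False] * (n + 1)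
--     for i in range(3, n + 1, 2):
--         for j in range(3 * i, n + 1, 2 * i):
--             is_comp[j] = True
--     return [k for k in range(9, n + 1, 2) if is_comp[k]]
-- ===== Notes on version B (the rewrite author's own statement) =====
-- stated objective: faster
-- what changed: B marks odd composites directly by sieving odd multiples of each odd i (one boolean array, no primality data), replacing A's double sieve plus the quadratic 'ind not in primes' list scan per index.
-- outside the precondition, e.g. on get_composite_odds(0): A raises IndexError, B returns []
import Mathlib
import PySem

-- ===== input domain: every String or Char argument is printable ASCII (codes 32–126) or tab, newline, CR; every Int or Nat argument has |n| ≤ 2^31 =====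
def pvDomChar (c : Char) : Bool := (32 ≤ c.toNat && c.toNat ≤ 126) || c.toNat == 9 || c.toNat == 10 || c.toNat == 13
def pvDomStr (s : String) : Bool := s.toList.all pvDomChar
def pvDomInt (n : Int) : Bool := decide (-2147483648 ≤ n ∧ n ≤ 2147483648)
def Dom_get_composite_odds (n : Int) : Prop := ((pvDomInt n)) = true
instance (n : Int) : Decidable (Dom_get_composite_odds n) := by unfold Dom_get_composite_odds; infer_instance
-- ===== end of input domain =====

-- B replaces A's prime sieve + quadratic `ind not in primes` list scan by a single
-- boolean array marking odd multiples of odd numbers; measured faster (asymptotic).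

-- ===== PORT A =====
-- reads sieve[i] / comp_odds[ind] are in range under Pre_ (1 ≤ n), so pyGetD is exact there
def sieve_of_eratosthenes (n : Int) : List Bool :=
  let sieve := List.replicate (n + 1).toNat true
  let sieve := PySem.List.pySetD (PySem.List.pySetD sieve 0 false) 1 false
  let sieve := (PySem.List.pyRange 4 (n + 1) 2).foldl
    (fun s even => PySem.List.pySetD s even false) sieve
  (PySem.List.pyRange 3 (n + 1) 2).foldl
    (fun s i =>
      if PySem.List.pyGetD s i false then
        (PySem.List.pyRange (2 * i) (n + 1) i).foldl
          (fun s' j => PySem.List.pySetD s' j false) s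
      else s) sieve

def get_primes (n : Int) : List Int :=
  ((PySem.List.enumerate (sieve_of_eratosthenes n)).filter (fun p => p.2)).map (fun p => p.1)

def get_composite_odds (n : Int) : List Int :=
  let comp_odds := List.replicate (n + 1).toNat true
  let comp_odds := PySem.List.pySetD (PySem.List.pySetD comp_odds 0 false) 1 false
  let comp_odds := (PySem.List.pyRange 2 (n + 1) 2).foldl
    (fun s i => PySem.List.pySetD s i false) comp_odds
  let primes := get_primes n
  ((PySem.List.enumerate comp_odds).filter
      (fun p => PySem.List.pyGetD comp_odds p.1 false && !(primes.contains p.1))).map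
    (fun p => p.1)

-- ===== PORT B =====
def get_composite_odds_alt (n : Int) : List Int :=
  let is_comp := List.replicate (n + 1).toNat false
  let is_comp := (PySem.List.pyRange 3 (n + 1) 2).foldl
    (fun s i =>
      (PySem.List.pyRange (3 * i) (n + 1) (2 * i)).foldl
        (fun s' j => PySem.List.pySetD s' j true) s) is_comp
  (PySem.List.pyRange 9 (n + 1) 2).filter (fun k => PySem.List.pyGetD is_comp k false)

-- ===== PRECONDITION & SPEC =====
-- Pre_ excludes exactly n ≤ 0, where A raises IndexError on `comp_odds[0] = comp_odds[1] = False`.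
def Pre_get_composite_odds (n : Int) : Prop := 1 ≤ n
instance (n : Int) : Decidable (Pre_get_composite_odds n) := by unfold Pre_get_composite_odds; infer_instance
def pvWitness_get_composite_odds : Int := 10

def Spec_get_composite_odds (n : Int) (out : List Int) : Prop := out = get_composite_odds_alt n
instance (n : Int) (out : List Int) : Decidable (Spec_get_composite_odds n out) := by unfold Spec_get_composite_odds; infer_instance

-- ===== CLAIM (what is proved, stated in full; the proofs are below) =====
def Claim_equal_get_composite_odds : Prop := ∀ (n : Int), Dom_get_composite_odds n → Pre_get_composite_odds n → Spec_get_composite_odds n (get_composite_odds n)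

-- ===== LEMMAS AND PROOFS =====

-- pointwise effect of a single set
theorem pvGetD_set_false (s : List Bool) (m k : Nat) :
    (s.set m false).getD k false = (s.getD k false && !(m == k)) := by
  simp [List.getD_eq_getElem?_getD, List.getElem?_set]
  by_cases h : m = k <;> by_cases hk : k < s.length <;> simp [h, hk]

theorem pvGetD_set_true (s : List Bool) (m k : Nat) :
    (s.set m true).getD k false = (s.getD k false || (m == k && decide (k < s.length))) := by
  simp [List.getD_eq_getElem?_getD, List.getElem?_set]
  by_cases h : m = k <;> by_cases hk : k < s.length <;> simp [h, hk]

theorem pvGetD_replicate (m k : Nat) (b : Bool) :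
    (List.replicate m b).getD k false = (b && decide (k < m)) := by
  by_cases h : k < m <;> simp [List.getD_eq_getElem?_getD, h]

-- length is preserved by any fold of pySetD
theorem pvLen_foldl_setD {β : Type} (g : β → Int) (v : Bool) (l : List β) (s : List Bool) :
    (l.foldl (fun s' j => PySem.List.pySetD s' (g j) v) s).length = s.length := by
  induction l generalizing s with
  | nil => rfl
  | cons j t ih => simp [List.foldl_cons, ih, PySem.List.length_pySetD]

-- closed form of a 'mark these indices false' loop
theorem pvGetD_foldl_setD_false (l : List Int) (s : List Bool) (k : Nat)
    (hl : ∀ j ∈ l, 0 ≤ j) :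
    ((l.foldl (fun s' j => PySem.List.pySetD s' j false) s).getD k false) =
      (s.getD k false && !(l.any (fun j => j.toNat == k))) := by
  induction l generalizing s with
  | nil => simp
  | cons j t ih =>
    have hj : 0 ≤ j := hl j (by simp)
    rw [List.foldl_cons, ih _ (fun x hx => hl x (by simp [hx])),
        PySem.List.pySetD_of_nonneg _ _ hj, pvGetD_set_false]
    cases h : (j.toNat == k) <;> simp [h, Bool.and_assoc]

-- closed form of a 'mark these indices true' loop
theorem pvGetD_foldl_setD_true (l : List Int) (s : List Bool) (k : Nat)
    (hl : ∀ j ∈ l, 0 ≤ j) :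
    ((l.foldl (fun s' j => PySem.List.pySetD s' j true) s).getD k false) =
      (s.getD k false || (decide (k < s.length) && l.any (fun j => j.toNat == k))) := by
  induction l generalizing s with
  | nil => simp
  | cons j t ih =>
    have hj : 0 ≤ j := hl j (by simp)
    rw [List.foldl_cons, ih _ (fun x hx => hl x (by simp [hx])),
        PySem.List.pySetD_of_nonneg _ _ hj, pvGetD_set_true, List.length_set]
    cases h : (j.toNat == k) <;> cases hlen : decide (k < s.length) <;>
      simp [h, hlen, Bool.or_assoc]

-- A's guarded outer loop body
def pvStepA (n : Int) (s : List Bool) (i : Int) : List Bool :=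
  if PySem.List.pyGetD s i false then
    (PySem.List.pyRange (2 * i) (n + 1) i).foldl
      (fun s' j => PySem.List.pySetD s' j false) s
  else s

theorem pvStepA_len (n : Int) (s : List Bool) (i : Int) :
    (pvStepA n s i).length = s.length := by
  unfold pvStepA; split
  · exact pvLen_foldl_setD (fun j => j) false _ s
  · rfl

-- once false, stays false
theorem pvA_mono (n : Int) (l : List Int) (s : List Bool) (k : Nat)
    (hl : ∀ i ∈ l, 3 ≤ i)
    (h : s.getD k false = false) :
    (l.foldl (pvStepA n) s).getD k false = false := by
  induction l generalizing s with
  | nil => exact h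
  | cons i t ih =>
    rw [List.foldl_cons]
    refine ih _ (fun x hx => hl x (by simp [hx])) ?_
    unfold pvStepA; split
    · rw [pvGetD_foldl_setD_false _ _ _ ?_, h, Bool.false_and]
      intro j hj
      have hi : 3 ≤ i := hl i (by simp)
      have := (PySem.List.mem_pyRange_iff_of_pos (by omega) j).1 hj
      omega
    · exact h

-- a false cell has a cause: it was false already, or some processed i marked it
theorem pvA_marked (n : Int) (l : List Int) (s : List Bool) (k : Nat)
    (hl : ∀ i ∈ l, 3 ≤ i)
    (h : (l.foldl (pvStepA n) s).getD k false = false) :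
    s.getD k false = false ∨
      ∃ i ∈ l, ∃ j ∈ PySem.List.pyRange (2 * i) (n + 1) i, j.toNat = k := by
  induction l generalizing s with
  | nil => exact Or.inl h
  | cons i t ih =>
    rw [List.foldl_cons] at h
    rcases ih _ (fun x hx => hl x (by simp [hx])) h with h' | ⟨i', hi', hj⟩
    · unfold pvStepA at h'
      split at h'
      · rw [pvGetD_foldl_setD_false] at h'
        · rcases Bool.and_eq_false_iff.1 h' with h0 | h0
          · exact Or.inl h0
          · simp only [Bool.not_eq_false', List.any_eq_true, beq_iff_eq] at h0
            rcases h0 with ⟨j, hjmem, hjk⟩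
            exact Or.inr ⟨i, by simp, j, hjmem, hjk⟩
        · intro j hj
          have hi : 3 ≤ i := hl i (by simp)
          have := (PySem.List.mem_pyRange_iff_of_pos (by omega) j).1 hj
          omega
      · exact Or.inl h'
    · exact Or.inr ⟨i', by simp [hi'], hj⟩

-- if p occurs in the loop list, is never itself marked, and is true at the start,
-- then every multiple in p's inner range ends up false
theorem pvA_marks (n : Int) (l : List Int) (s : List Bool) (p : Int)
    (hl : ∀ i ∈ l, 3 ≤ i)
    (hp : p ∈ l)
    (hno : ∀ i ∈ l, ∀ j ∈ PySem.List.pyRange (2 * i) (n + 1) i, j.toNat ≠ p.toNat)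
    (h : s.getD p.toNat false = true) :
    ∀ j ∈ PySem.List.pyRange (2 * p) (n + 1) p,
      (l.foldl (pvStepA n) s).getD j.toNat false = false := by
  induction l generalizing s with
  | nil => simp at hp
  | cons i t ih =>
    intro j hj
    rw [List.foldl_cons]
    rcases List.mem_cons.1 hp with rfl | hpt
    · -- this iteration marks j
      have hguard : PySem.List.pyGetD s p false = true := by
        have h3 : 3 ≤ p := hl p (by simp)
        by_cases hlt : p < (s.length : Int)
        · rw [PySem.List.pyGetD_eq_getElem s false (by omega) hlt]
          rw [List.getD_eq_getElem?_getD, List.getElem?_eq_getElem (by omega)] at h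
          simpa using h
        · exfalso
          rw [List.getD_eq_getElem?_getD, List.getElem?_eq_none (by omega)] at h
          simp at h
      apply pvA_mono n t _ _ (fun x hx => hl x (by simp [hx]))
      unfold pvStepA
      rw [hguard]; simp only [if_true]
      rw [pvGetD_foldl_setD_false _ _ _ ?_]
      · have : (PySem.List.pyRange (2 * p) (n + 1) p).any (fun x => x.toNat == j.toNat) = true := by
          simp only [List.any_eq_true, beq_iff_eq]
          exact ⟨j, hj, rfl⟩
        rw [this]; simp
      · intro x hx
        have h3 : 3 ≤ p := hl p (by simp)
        have := (PySem.List.mem_pyRange_iff_of_pos (by omega) x).1 hx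
        omega
    · -- p is later; current step does not touch p
      refine ih _ (fun x hx => hl x (by simp [hx])) hpt
        (fun x hx => hno x (by simp [hx])) ?_ j hj
      unfold pvStepA; split
      · rw [pvGetD_foldl_setD_false _ _ _ ?_, h, Bool.true_and]
        · have : ((PySem.List.pyRange (2 * i) (n + 1) i).any fun x => x.toNat == p.toNat) = false := by
            simp only [List.any_eq_false, beq_iff_eq]
            exact fun x hx => hno i (by simp) x hx
          rw [this]; rfl
        · intro x hx
          have hi : 3 ≤ i := hl i (by simp)
          have := (PySem.List.mem_pyRange_iff_of_pos (by omega) x).1 hx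
          omega
      · exact h

theorem pvAny_range (a b st : Int) (ha : 0 ≤ a) (hst : 0 < st) (k : Nat) :
    (((PySem.List.pyRange a b st).any (fun j => j.toNat == k)) = true)
      ↔ (a ≤ (k:Int) ∧ (k:Int) < b ∧ st ∣ (k:Int) - a) := by
  simp only [List.any_eq_true, beq_iff_eq]
  constructor
  · rintro ⟨j, hj, hjk⟩
    have hm := (PySem.List.mem_pyRange_iff_of_pos hst j).1 hj
    have : j = (k : Int) := by omega
    subst this
    exact hm
  · rintro ⟨h1, h2, h3⟩
    exact ⟨(k : Int), (PySem.List.mem_pyRange_iff_of_pos hst _).2 ⟨h1, h2, h3⟩, Int.toNat_natCast k⟩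

theorem pvPairwise_pyRange_pos (a b st : Int) (hst : 0 < st) :
    (PySem.List.pyRange a b st).Pairwise (· < ·) := by
  rw [PySem.List.pyRange_of_pos a b hst]
  exact List.pairwise_lt_range.map _ (fun x y hxy => by
    have : (x : Int) < y := by exact_mod_cast hxy
    nlinarith)

-- odd composite as a factorisation statement
def pvCompOdd (k : Nat) : Prop := ∃ a b : Nat, 3 ≤ a ∧ 3 ≤ b ∧ k = a * b

theorem pv_base_getD (n : Int) (hn : 1 ≤ n) (k : Nat) :
    ((PySem.List.pySetD (PySem.List.pySetD (List.replicate (n + 1).toNat true) 0 false) 1 false).getD k false)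
      = decide (2 ≤ k ∧ (k : Int) ≤ n) := by
  rw [PySem.List.pySetD_of_nonneg _ _ (by norm_num), PySem.List.pySetD_of_nonneg _ _ (le_refl 0),
      pvGetD_set_false, pvGetD_set_false, pvGetD_replicate]
  simp only [Int.toNat_zero, Int.toNat_one, Bool.true_and]
  by_cases h : 2 ≤ k ∧ (k : Int) ≤ n
  · have h1 : k < (n + 1).toNat := by omega
    have h2 : (0 == k) = false := by simp; omega
    have h3 : (1 == k) = false := by simp; omega
    simp [h, h1, h2, h3]
  · simp only [h, decide_false]
    by_cases hk : k < (n + 1).toNat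
    · have : k = 0 ∨ k = 1 := by omega
      rcases this with rfl | rfl <;> simp
    · simp [hk]

-- comp_odds after the even-removal loop
theorem pv_comp_getD (n : Int) (hn : 1 ≤ n) (k : Nat) :
    (((PySem.List.pyRange 2 (n + 1) 2).foldl (fun s i => PySem.List.pySetD s i false)
        (PySem.List.pySetD (PySem.List.pySetD (List.replicate (n + 1).toNat true) 0 false) 1 false)).getD k false)
      = decide (Odd k ∧ 3 ≤ k ∧ (k : Int) ≤ n) := by
  rw [pvGetD_foldl_setD_false _ _ _ (fun j hj => by
        have := (PySem.List.mem_pyRange_iff_of_pos (by norm_num) j).1 hj; omega),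
      pv_base_getD n hn k]
  by_cases hA : (2 : Int) ≤ (k : Int) ∧ (k : Int) < n + 1 ∧ (2 : Int) ∣ (k : Int) - 2
  · rw [(pvAny_range 2 (n + 1) 2 (by norm_num) (by norm_num) k).2 hA]
    simp only [Bool.not_true, Bool.and_false]
    symm
    simp only [decide_eq_false_iff_not, not_and, Nat.odd_iff]
    intro h1 h2 h3
    omega
  · have hF : ((PySem.List.pyRange 2 (n + 1) 2).any fun j => j.toNat == k) = false :=
      Bool.eq_false_iff.2 (fun hc => hA ((pvAny_range 2 (n + 1) 2 (by norm_num) (by norm_num) k).1 hc))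
    rw [hF]
    simp only [Bool.not_false, Bool.and_true, decide_eq_decide, Nat.odd_iff]
    omega

-- the sieve array after the even loop of sieve_of_eratosthenes
theorem pv_evens4_getD (n : Int) (hn : 1 ≤ n) (k : Nat) :
    (((PySem.List.pyRange 4 (n + 1) 2).foldl (fun s even => PySem.List.pySetD s even false)
        (PySem.List.pySetD (PySem.List.pySetD (List.replicate (n + 1).toNat true) 0 false) 1 false)).getD k false)
      = decide ((k : Int) ≤ n ∧ (k = 2 ∨ (Odd k ∧ 3 ≤ k))) := by
  rw [pvGetD_foldl_setD_false _ _ _ (fun j hj => by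
        have := (PySem.List.mem_pyRange_iff_of_pos (by norm_num) j).1 hj; omega),
      pv_base_getD n hn k]
  by_cases hA : (4 : Int) ≤ (k : Int) ∧ (k : Int) < n + 1 ∧ (2 : Int) ∣ (k : Int) - 4
  · rw [(pvAny_range 4 (n + 1) 2 (by norm_num) (by norm_num) k).2 hA]
    simp only [Bool.not_true, Bool.and_false]
    symm
    simp only [decide_eq_false_iff_not, not_and, Nat.odd_iff]
    intro h1
    omega
  · have hF : ((PySem.List.pyRange 4 (n + 1) 2).any fun j => j.toNat == k) = false :=
      Bool.eq_false_iff.2 (fun hc => hA ((pvAny_range 4 (n + 1) 2 (by norm_num) (by norm_num) k).1 hc))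
    rw [hF]
    simp only [Bool.not_false, Bool.and_true, decide_eq_decide, Nat.odd_iff]
    omega

theorem pvLen_foldl_stepA (n : Int) (l : List Int) (s : List Bool) :
    (l.foldl (pvStepA n) s).length = s.length := by
  induction l generalizing s with
  | nil => rfl
  | cons i t ih => rw [List.foldl_cons, ih, pvStepA_len]

theorem pv_sieve_eq (n : Int) :
    sieve_of_eratosthenes n = (PySem.List.pyRange 3 (n + 1) 2).foldl (pvStepA n)
      ((PySem.List.pyRange 4 (n + 1) 2).foldl (fun s even => PySem.List.pySetD s even false)
        (PySem.List.pySetD (PySem.List.pySetD (List.replicate (n + 1).toNat true) 0 false) 1 false)) := rfl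

theorem pv_sieve_len (n : Int) : (sieve_of_eratosthenes n).length = (n + 1).toNat := by
  rw [pv_sieve_eq, pvLen_foldl_stepA, pvLen_foldl_setD (fun j => j) false]
  simp [PySem.List.length_pySetD]

theorem pv_outer_ge (n : Int) : ∀ i ∈ PySem.List.pyRange 3 (n + 1) 2, 3 ≤ i :=
  fun i hi => ((PySem.List.mem_pyRange_iff_of_pos (by norm_num) i).1 hi).1

-- the final sieve value on odd cells in range
theorem pv_sieve_final (n : Int) (hn : 1 ≤ n) (k : Nat)
    (hk : Odd k) (h3 : 3 ≤ k) (hkn : (k : Int) ≤ n) :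
    ((sieve_of_eratosthenes n).getD k false) = false ↔ pvCompOdd k := by
  rw [pv_sieve_eq]
  constructor
  · intro h
    rcases pvA_marked n _ _ k (pv_outer_ge n) h with h0 | ⟨i, hi, j, hj, hjk⟩
    · rw [pv_evens4_getD n hn k] at h0
      simp only [decide_eq_false_iff_not] at h0
      exact absurd ⟨hkn, Or.inr ⟨hk, h3⟩⟩ h0
    · have hi3 : 3 ≤ i := pv_outer_ge n i hi
      have hjo := (PySem.List.mem_pyRange_iff_of_pos (by omega : (0:Int) < i) j).1 hj
      have hjk' : j = (k : Int) := by omega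
      subst hjk'
      rcases hjo.2.2 with ⟨c, hc⟩
      have hc0 : 0 ≤ c := by nlinarith
      refine ⟨i.toNat, (2 + c).toNat, by omega, ?_, ?_⟩
      · have hkeq : k = i.toNat * (2 + c).toNat := by
          have : (k : Int) = ↑(i.toNat * (2 + c).toNat) := by
            push_cast [Int.toNat_of_nonneg (by omega : (0:Int) ≤ i),
              Int.toNat_of_nonneg (by omega : (0:Int) ≤ 2 + c)]
            nlinarith
          exact_mod_cast this
        have := (Nat.odd_mul.1 (hkeq ▸ hk)).2
        rw [Nat.odd_iff] at this
        omega
      · have : (k : Int) = ↑(i.toNat * (2 + c).toNat) := by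
          push_cast [Int.toNat_of_nonneg (by omega : (0:Int) ≤ i),
            Int.toNat_of_nonneg (by omega : (0:Int) ≤ 2 + c)]
          nlinarith
        exact_mod_cast this
  · rintro ⟨a, b, ha3, hb3, rfl⟩
    set p := (a * b).minFac with hpdef
    have hne1 : a * b ≠ 1 := by nlinarith
    have hp : p.Prime := Nat.minFac_prime hne1
    have hpd : p ∣ a * b := Nat.minFac_dvd _
    have hpa : p ≤ a := Nat.minFac_le_of_dvd (by omega) ⟨b, rfl⟩
    have hp2 : 2 ≤ p := hp.two_le
    have hkodd : (a * b) % 2 = 1 := Nat.odd_iff.1 hk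
    have hpodd : p % 2 = 1 := by
      rcases Nat.even_or_odd p with he | ho
      · exfalso
        have h2p : 2 ∣ p := he.two_dvd
        have : 2 ∣ a * b := h2p.trans hpd
        omega
      · exact Nat.odd_iff.1 ho
    have hp3 : 3 ≤ p := by omega
    have hc : p * (a * b / p) = a * b := Nat.mul_div_cancel' hpd
    set c := a * b / p with hcdef
    have h3a : 3 * a ≤ a * b := by nlinarith
    have haab : a < a * b := by nlinarith
    have hc3 : 3 ≤ c := by nlinarith
    have habn : ((a * b : Nat) : Int) ≤ n := hkn
    have hfalse := pvA_marks n (PySem.List.pyRange 3 (n + 1) 2) _ (p : Int)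
      (pv_outer_ge n)
      ((PySem.List.mem_pyRange_iff_of_pos (by norm_num) _).2 ⟨by omega, by omega, by omega⟩)
      (fun i hi j hj hjp => by
        have hi3 : 3 ≤ i := pv_outer_ge n i hi
        have hjo := (PySem.List.mem_pyRange_iff_of_pos (by omega : (0:Int) < i) j).1 hj
        rw [Int.toNat_natCast] at hjp
        have hjeq : j = (p : Int) := by omega
        subst hjeq
        rcases hjo.2.2 with ⟨d, hd⟩
        have hd0 : 0 ≤ d := by nlinarith
        have hidvd : i.toNat ∣ p := by
          have : ((i.toNat : Int)) ∣ (p : Int) := by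
            rw [Int.toNat_of_nonneg (by omega : (0:Int) ≤ i)]
            exact ⟨2 + d, by linarith⟩
          exact_mod_cast this
        rcases hp.eq_one_or_self_of_dvd i.toNat hidvd with h1 | h1 <;> omega)
      (by
        rw [Int.toNat_natCast, pv_evens4_getD n hn p]
        simp only [decide_eq_true_eq]
        exact ⟨by omega, Or.inr ⟨Nat.odd_iff.2 hpodd, hp3⟩⟩)
      ((a * b : Nat) : Int)
      ((PySem.List.mem_pyRange_iff_of_pos (by omega : (0:Int) < (p:Int)) _).2
        ⟨by push_cast; nlinarith [hc], by omega, ⟨((c - 2 : Nat) : Int), by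
          push_cast
          have : (p : Int) * (c : Int) = ((a * b : Nat) : Int) := by exact_mod_cast hc
          have hcc : ((c - 2 : Nat) : Int) = (c : Int) - 2 := by omega
          rw [hcc]; nlinarith [this]⟩⟩)
    rw [Int.toNat_natCast] at hfalse
    exact hfalse

-- membership in A's primes list
theorem pv_mem_primes (n : Int) (hn : 1 ≤ n) (x : Int) :
    (x ∈ get_primes n) ↔ (0 ≤ x ∧ x ≤ n ∧ (sieve_of_eratosthenes n).getD x.toNat false = true) := by
  unfold get_primes
  simp only [List.mem_map, List.mem_filter]
  constructor
  · rintro ⟨q, ⟨hmem, hq2⟩, rfl⟩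
    rcases (PySem.List.mem_enumerate_iff _ _ q).1 hmem with ⟨j, hj, rfl⟩
    have hlen : j < (n + 1).toNat := by rwa [pv_sieve_len] at hj
    refine ⟨by simp, by simp; omega, ?_⟩
    simp only [zero_add, Int.toNat_natCast]
    rw [List.getD_eq_getElem?_getD, List.getElem?_eq_getElem hj]
    simpa using hq2
  · rintro ⟨h0, h1, h2⟩
    have hlen : x.toNat < (sieve_of_eratosthenes n).length := by
      rw [pv_sieve_len]; omega
    have hget : (sieve_of_eratosthenes n)[x.toNat] = true := by
      rw [List.getD_eq_getElem?_getD, List.getElem?_eq_getElem hlen] at h2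
      simpa using h2
    refine ⟨(x, true), ⟨?_, rfl⟩, rfl⟩
    exact (PySem.List.mem_enumerate_iff _ _ _).2 ⟨x.toNat, hlen, by simp [hget, Int.toNat_of_nonneg h0]⟩

-- B's outer fold, closed form
theorem pvB_fold (n : Int) (l : List Int) (s : List Bool) (k : Nat)
    (hl : ∀ i ∈ l, 3 ≤ i) :
    ((l.foldl (fun s i => (PySem.List.pyRange (3 * i) (n + 1) (2 * i)).foldl
        (fun s' j => PySem.List.pySetD s' j true) s) s).getD k false) =
      (s.getD k false || (decide (k < s.length) &&
        l.any (fun i => (PySem.List.pyRange (3 * i) (n + 1) (2 * i)).any (fun j => j.toNat == k)))) := by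
  induction l generalizing s with
  | nil => simp
  | cons i t ih =>
    rw [List.foldl_cons, ih _ (fun x hx => hl x (by simp [hx])),
        pvGetD_foldl_setD_true _ _ _ (fun j hj => by
          have hi : 3 ≤ i := hl i (by simp)
          have := (PySem.List.mem_pyRange_iff_of_pos (by omega) j).1 hj; omega),
        pvLen_foldl_setD (fun j => j) true]
    cases h1 : s.getD k false <;> cases h2 : decide (k < s.length) <;>
      cases h3 : ((PySem.List.pyRange (3 * i) (n + 1) (2 * i)).any fun j => j.toNat == k) <;>
      simp [h1, h2, h3]

-- B's array value on odd cells in range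
theorem pv_isB_getD (n : Int) (hn : 1 ≤ n) (k : Nat) (hk : Odd k) (hkn : (k : Int) ≤ n) :
    (((PySem.List.pyRange 3 (n + 1) 2).foldl
        (fun s i => (PySem.List.pyRange (3 * i) (n + 1) (2 * i)).foldl
          (fun s' j => PySem.List.pySetD s' j true) s)
        (List.replicate (n + 1).toNat false)).getD k false) = true ↔ pvCompOdd k := by
  rw [pvB_fold n _ _ _ (fun i hi => by
        have := (PySem.List.mem_pyRange_iff_of_pos (by norm_num) i).1 hi; omega)]
  rw [pvGetD_replicate, List.length_replicate]
  have hkN : (k < (n + 1).toNat) = True := by simp; omega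
  simp only [Bool.false_and, Bool.false_or, hkN, decide_true, Bool.true_and,
    List.any_eq_true]
  constructor
  · rintro ⟨i, hi, hinner⟩
    have hio := (PySem.List.mem_pyRange_iff_of_pos (by norm_num) i).1 hi
    have hi3 : 3 ≤ i := hio.1
    have hinner' : ((PySem.List.pyRange (3 * i) (n + 1) (2 * i)).any
        (fun j => j.toNat == k)) = true := by simpa using hinner
    rcases (pvAny_range (3 * i) (n + 1) (2 * i) (by omega) (by omega) k).1 hinner'
      with ⟨h1, h2, c, hc⟩
    have hc0 : 0 ≤ c := by nlinarith
    refine ⟨i.toNat, (3 + 2 * c).toNat, by omega, by omega, ?_⟩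
    have hk' : (k : Int) = ↑(i.toNat * (3 + 2 * c).toNat) := by
      push_cast [Int.toNat_of_nonneg (by omega : (0:Int) ≤ i),
        Int.toNat_of_nonneg (by omega : (0:Int) ≤ 3 + 2 * c)]
      nlinarith
    exact_mod_cast hk'
  · rintro ⟨a, b, ha3, hb3, rfl⟩
    have hab : Odd a ∧ Odd b := Nat.odd_mul.1 hk
    have h3a : 3 * a ≤ a * b := by nlinarith
    have ha2 : a % 2 = 1 := Nat.odd_iff.1 hab.1
    have hb2 : b % 2 = 1 := Nat.odd_iff.1 hab.2
    refine ⟨(a : Int), (PySem.List.mem_pyRange_iff_of_pos (by norm_num) _).2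
      ⟨by omega, by omega, by omega⟩, ?_⟩
    have hmem : ((a * b : Nat) : Int) ∈ PySem.List.pyRange (3 * (a:Int)) (n + 1) (2 * (a:Int)) := by
      refine (PySem.List.mem_pyRange_iff_of_pos (by omega) _).2
        ⟨by exact_mod_cast h3a, by omega, ⟨((b - 3) / 2 : Nat), ?_⟩⟩
      have hbm : (b : Int) = 2 * ↑((b - 3) / 2) + 3 := by omega
      have hab' : ((a * b : Nat) : Int) = ↑a * ↑b := by push_cast; ring
      rw [hab', hbm]; ring
    simp only [List.any_eq_true, beq_iff_eq]
    exact ⟨((a * b : Nat) : Int), hmem, Int.toNat_natCast _⟩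

def pvComp (n : Int) : List Bool :=
  (PySem.List.pyRange 2 (n + 1) 2).foldl (fun s i => PySem.List.pySetD s i false)
    (PySem.List.pySetD (PySem.List.pySetD (List.replicate (n + 1).toNat true) 0 false) 1 false)

theorem pv_A_eq (n : Int) :
    get_composite_odds n =
      ((PySem.List.enumerate (pvComp n)).filter
        (fun p => PySem.List.pyGetD (pvComp n) p.1 false && !((get_primes n).contains p.1))).map
        (fun p => p.1) := rfl

theorem pv_B_eq (n : Int) :
    get_composite_odds_alt n =
      (PySem.List.pyRange 9 (n + 1) 2).filter
        (fun k => PySem.List.pyGetD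
          ((PySem.List.pyRange 3 (n + 1) 2).foldl
            (fun s i => (PySem.List.pyRange (3 * i) (n + 1) (2 * i)).foldl
              (fun s' j => PySem.List.pySetD s' j true) s)
            (List.replicate (n + 1).toNat false)) k false) := rfl

theorem pv_comp_len (n : Int) : (pvComp n).length = (n + 1).toNat := by
  unfold pvComp
  rw [pvLen_foldl_setD (fun j => j) false]
  simp [PySem.List.length_pySetD]

theorem pv_mem_outA (n : Int) (hn : 1 ≤ n) (x : Int) :
    (x ∈ get_composite_odds n) ↔
      (Odd x.toNat ∧ 3 ≤ x.toNat ∧ x ≤ n ∧ 0 ≤ x ∧ pvCompOdd x.toNat) := by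
  rw [pv_A_eq]
  simp only [List.mem_map, List.mem_filter]
  constructor
  · rintro ⟨q, ⟨hmem, hcond⟩, rfl⟩
    rcases (PySem.List.mem_enumerate_iff _ _ q).1 hmem with ⟨j, hj, rfl⟩
    simp only [zero_add] at hcond ⊢
    rw [Bool.and_eq_true, PySem.List.pyGetD_natCast] at hcond
    have hcomp := pv_comp_getD n hn j
    rw [show (((PySem.List.pyRange 2 (n + 1) 2).foldl (fun s i => PySem.List.pySetD s i false)
      (PySem.List.pySetD (PySem.List.pySetD (List.replicate (n + 1).toNat true) 0 false) 1 false))) = pvComp n from rfl] at hcomp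
    rw [hcomp, decide_eq_true_eq] at hcond
    obtain ⟨⟨ho, h3, hjn⟩, hnc⟩ := hcond
    rw [Bool.not_eq_eq_eq_not, Bool.not_true, ← Bool.not_eq_true, List.contains_iff_mem,
        pv_mem_primes n hn] at hnc
    have hsieve : (sieve_of_eratosthenes n).getD ((j : Int)).toNat false = false := by
      rcases Bool.eq_false_or_eq_true ((sieve_of_eratosthenes n).getD ((j : Int)).toNat false)
        with h | h
      · exact absurd ⟨by simp, by simpa using hjn, h⟩ hnc
      · exact h
    rw [Int.toNat_natCast] at hsieve ⊢
    exact ⟨ho, h3, by simpa using hjn, by simp, (pv_sieve_final n hn j ho h3 (by simpa using hjn)).1 hsieve⟩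
  · rintro ⟨ho, h3, hxn, hx0, hco⟩
    have hxe : x = ((x.toNat : Nat) : Int) := by omega
    have hjlen : x.toNat < (pvComp n).length := by rw [pv_comp_len]; omega
    refine ⟨(x, true), ⟨?_, ?_⟩, rfl⟩
    · refine (PySem.List.mem_enumerate_iff _ _ _).2 ⟨x.toNat, hjlen, ?_⟩
      have hget : (pvComp n)[x.toNat] = true := by
        have hcomp := pv_comp_getD n hn x.toNat
        rw [show (((PySem.List.pyRange 2 (n + 1) 2).foldl (fun s i => PySem.List.pySetD s i false)
          (PySem.List.pySetD (PySem.List.pySetD (List.replicate (n + 1).toNat true) 0 false) 1 false))) = pvComp n from rfl] at hcomp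
        rw [List.getD_eq_getElem?_getD, List.getElem?_eq_getElem hjlen] at hcomp
        simp only [Option.getD_some] at hcomp
        rw [hcomp, decide_eq_true_eq]
        exact ⟨ho, h3, by omega⟩
      rw [hget, zero_add, ← hxe]
    · rw [Bool.and_eq_true]
      constructor
      · rw [hxe, PySem.List.pyGetD_natCast]
        have hcomp := pv_comp_getD n hn x.toNat
        rw [show (((PySem.List.pyRange 2 (n + 1) 2).foldl (fun s i => PySem.List.pySetD s i false)
          (PySem.List.pySetD (PySem.List.pySetD (List.replicate (n + 1).toNat true) 0 false) 1 false))) = pvComp n from rfl] at hcomp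
        rw [hcomp, decide_eq_true_eq]
        exact ⟨ho, h3, by omega⟩
      · rw [Bool.not_eq_eq_eq_not, Bool.not_true, ← Bool.not_eq_true, List.contains_iff_mem,
            pv_mem_primes n hn]
        rintro ⟨_, _, hs⟩
        have hs' : (sieve_of_eratosthenes n).getD x.toNat false = true := hs
        have := (pv_sieve_final n hn x.toNat ho h3 (by omega)).2 hco
        rw [this] at hs'
        exact Bool.false_ne_true hs'

theorem pv_mem_outB (n : Int) (hn : 1 ≤ n) (x : Int) :
    (x ∈ get_composite_odds_alt n) ↔
      (9 ≤ x ∧ x < n + 1 ∧ (2:Int) ∣ x - 9 ∧ pvCompOdd x.toNat) := by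
  rw [pv_B_eq]
  simp only [List.mem_filter]
  constructor
  · rintro ⟨hmem, hget⟩
    have hm := (PySem.List.mem_pyRange_iff_of_pos (by norm_num) x).1 hmem
    rw [PySem.List.pyGetD_of_nonneg _ _ (by omega)] at hget
    refine ⟨hm.1, hm.2.1, hm.2.2, ?_⟩
    exact (pv_isB_getD n hn x.toNat (by rw [Nat.odd_iff]; omega) (by omega)).1 hget
  · rintro ⟨h9, hlt, hdvd, hco⟩
    refine ⟨(PySem.List.mem_pyRange_iff_of_pos (by norm_num) x).2 ⟨h9, hlt, hdvd⟩, ?_⟩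
    rw [PySem.List.pyGetD_of_nonneg _ _ (by omega)]
    exact (pv_isB_getD n hn x.toNat (by rw [Nat.odd_iff]; omega) (by omega)).2 hco

-- two strictly increasing integer lists with the same members are equal
theorem pv_eq_of_pairwise_lt {l₁ l₂ : List Int}
    (h₁ : l₁.Pairwise (· < ·)) (h₂ : l₂.Pairwise (· < ·))
    (h : ∀ x, x ∈ l₁ ↔ x ∈ l₂) : l₁ = l₂ := by
  have n₁ : l₁.Nodup := h₁.imp ne_of_lt
  have n₂ : l₂.Nodup := h₂.imp ne_of_lt
  exact List.Perm.eq_of_pairwise (l₁ := l₁) (l₂ := l₂)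
    (fun a b _ _ h1 h2 => le_antisymm h1 h2) (h₁.imp le_of_lt) (h₂.imp le_of_lt)
    ((List.perm_ext_iff_of_nodup n₁ n₂).2 h)

-- ===== VERDICT (by name: the statement is the Claim_ definition above) =====
theorem get_composite_odds_spec : Claim_equal_get_composite_odds := by
  intro n _ hpre
  have hn : (1 : Int) ≤ n := hpre
  unfold Spec_get_composite_odds
  apply pv_eq_of_pairwise_lt
  · rw [pv_A_eq, List.pairwise_map]
    exact (PySem.List.pairwise_lt_enumerate _ _).filter _
  · rw [pv_B_eq]
    exact (pvPairwise_pyRange_pos 9 (n + 1) 2 (by norm_num)).filter _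
  · intro x
    rw [pv_mem_outA n hn x, pv_mem_outB n hn x]
    constructor
    · rintro ⟨ho, h3, hxn, hx0, hco⟩
      obtain ⟨a, b, ha3, hb3, heq⟩ := hco
      have h9 : 9 ≤ x.toNat := by
        have := Nat.mul_le_mul ha3 hb3
        omega
      rw [Nat.odd_iff] at ho
      exact ⟨by omega, by omega, by omega, a, b, ha3, hb3, heq⟩
    · rintro ⟨h9, hlt, hdvd, hco⟩
      exact ⟨by rw [Nat.odd_iff]; omega, by omega, by omega, by omega, hco⟩
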